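-- pv_equiv track=rewrite | github.com/isbrycee/OralGPT | MMOral-Omni/pure_text_conv/textbook_txt_to_structured_json.py | split_into_two_by_newline
-- ===== SOURCE A (Python) =====
-- from typing import List, Tuple, Optional, Dict
--
-- def split_into_two_by_newline(text: str) -> List[str]:
--     """ 将文本按最接近中点的换行符拆成两段；若没有换行，则按字符中点拆。 返回两个去除首尾空白的子串。 """
--     newlines = [i for i, ch in enumerate(text) if ch == "\n"]
--     if not newlines:
--         mid = len(text) // 2
--         left = text[:mid].strip()
--         right = text[mid:].strip()
--         return [s for s in [left, right] if s]
--
--     target = len(text) // 2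
--     split_idx = min(newlines, key=lambda i: abs(i - target))
--
--     left = text[:split_idx].rstrip("\n").strip()
--     right = text[split_idx + 1 :].strip()
--
--     # 避免极端情况下产生空段，回退到字符中点
--     if not left or not right:
--         mid = len(text) // 2
--         left = text[:mid].strip()
--         right = text[mid:].strip()
--
--     return [s for s in [left, right] if s]
-- ===== SOURCE B (Python) =====
-- from typing import List
--
--
-- def split_into_two_by_newline(text: str) -> List[str]:
--     # Expanding ring search: probe outward from the character midpoint
--     # (before-side first at each distance, matching min's first-minimum rule)
--     # and stop at the first newline found, instead of collecting every
--     # newline position and min-scanning the whole list.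
--     n = len(text)
--     target = n // 2
--     split_idx = -1
--     for d in range(max(target, n - target) + 1):
--         i = target - d
--         j = target + d
--         if 0 <= i < n and text[i] == "\n":
--             split_idx = i
--             break
--         if j < n and text[j] == "\n":
--             split_idx = j
--             break
--     if split_idx != -1:
--         left = text[:split_idx].strip()
--         right = text[split_idx + 1:].strip()
--         if left and right:
--             return [left, right]
--     left = text[:target].strip()
--     right = text[target:].strip()
--     return [s for s in [left, right] if s]
-- ===== Notes on version B (the rewrite author's own statement) =====
-- stated objective: alternative
-- what changed: B replaces A's full scan (collect every newline index, then min with a distance key) by an expanding ring search that probes outward from the character midpoint (before side first at each distance) and stops at the first newline found; it also drops the redundant right-trim of trailing newline characters before strip().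
import Mathlib
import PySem

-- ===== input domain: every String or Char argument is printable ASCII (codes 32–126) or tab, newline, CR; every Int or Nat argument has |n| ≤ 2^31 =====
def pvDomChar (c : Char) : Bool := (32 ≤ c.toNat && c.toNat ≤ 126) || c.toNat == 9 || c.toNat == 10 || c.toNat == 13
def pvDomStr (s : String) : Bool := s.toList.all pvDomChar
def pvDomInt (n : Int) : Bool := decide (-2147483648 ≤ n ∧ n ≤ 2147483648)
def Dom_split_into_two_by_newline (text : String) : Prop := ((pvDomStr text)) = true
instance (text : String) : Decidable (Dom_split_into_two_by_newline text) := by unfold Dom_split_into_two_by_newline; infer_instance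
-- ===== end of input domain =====

-- B replaces A's collect-all-newlines + min-scan by an expanding ring search outward from
-- the character midpoint (before side probed first at each distance, matching min's
-- first-minimum rule), and drops the redundant right-trim of trailing newline characters
-- before strip(); same return value.


-- ===== PORT A =====
-- 'text[:i].rstrip("\n")' ported by hand: removes exactly the trailing '\n' characters (exact).
def split_into_two_by_newline (text : String) : List String :=
  let cs := text.toList
  let newlines := ((PySem.List.enumerate cs).filter (fun p => p.2 == '\n')).map (fun p => p.1)
  if newlines = [] then
    let mid := PySem.Int.floordiv (cs.length : Int) 2
    let left := PySem.Chars.strip (PySem.List.slice cs none (some mid))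
    let right := PySem.Chars.strip (PySem.List.slice cs (some mid) none)
    ([left, right].filter (fun s => !s.isEmpty)).map String.ofList
  else
    let target := PySem.Int.floordiv (cs.length : Int) 2
    match PySem.List.min? newlines (fun i => |i - target|) with
    | none => []  -- unreachable: Python's min always returns here (newlines ≠ [])
    | some split_idx =>
      let left := PySem.Chars.strip
        (List.rdropWhile (fun c => c == '\n') (PySem.List.slice cs none (some split_idx)))
      let right := PySem.Chars.strip (PySem.List.slice cs (some (split_idx + 1)) none)
      let pair :=
        if left = [] ∨ right = [] then
          let mid := PySem.Int.floordiv (cs.length : Int) 2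
          (PySem.Chars.strip (PySem.List.slice cs none (some mid)),
           PySem.Chars.strip (PySem.List.slice cs (some mid) none))
        else (left, right)
      ([pair.1, pair.2].filter (fun s => !s.isEmpty)).map String.ofList

-- ===== PORT B =====
-- The 'for d in range(…): … break' loop of Source B: fuel = remaining iterations, d the probe distance.
def pvRing (cs : List Char) (n target : Int) : Nat → Int → Int
  | 0, _ => -1
  | fuel+1, d =>
    let i := target - d
    let j := target + d
    if decide (0 ≤ i) && decide (i < n) && (PySem.List.pyGetD cs i ' ' == '\n') then i
    else if decide (j < n) && (PySem.List.pyGetD cs j ' ' == '\n') then j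
    else pvRing cs n target fuel (d + 1)

def split_into_two_by_newline_alt (text : String) : List String :=
  let cs := text.toList
  let n : Int := cs.length
  let target := PySem.Int.floordiv n 2
  let split_idx := pvRing cs n target (max target (n - target) + 1).toNat 0
  let tail :=
    let left := PySem.Chars.strip (PySem.List.slice cs none (some target))
    let right := PySem.Chars.strip (PySem.List.slice cs (some target) none)
    ([left, right].filter (fun s => !s.isEmpty)).map String.ofList
  if split_idx ≠ -1 then
    let left := PySem.Chars.strip (PySem.List.slice cs none (some split_idx))
    let right := PySem.Chars.strip (PySem.List.slice cs (some (split_idx + 1)) none)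
    if !left.isEmpty && !right.isEmpty then [String.ofList left, String.ofList right]
    else tail
  else tail

-- ===== PRECONDITION & SPEC =====
def Spec_split_into_two_by_newline (text : String) (out : List String) : Prop := out = split_into_two_by_newline_alt text
instance (text : String) (out : List String) : Decidable (Spec_split_into_two_by_newline text out) := by unfold Spec_split_into_two_by_newline; infer_instance

-- ===== CLAIM (what is proved, stated in full; the proofs are below) =====
def Claim_equal_split_into_two_by_newline : Prop := ∀ (text : String), Dom_split_into_two_by_newline text → Spec_split_into_two_by_newline text (split_into_two_by_newline text)

-- ===== LEMMAS AND PROOFS =====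

-- 'i is the position of a newline' as a predicate on Int indices.
def pvNL (cs : List Char) (i : Int) : Prop :=
  0 ≤ i ∧ i < (cs.length : Int) ∧ cs[i.toNat]? = some '\n'

theorem pv_mem_newlines (cs : List Char) (s i : Int) :
    i ∈ ((PySem.List.enumerate cs s).filter (fun p => p.2 == '\n')).map (fun p => p.1) ↔
    ∃ k : Nat, i = s + k ∧ cs[k]? = some '\n' := by
  induction cs generalizing s with
  | nil => simp [PySem.List.enumerate]
  | cons x t ih =>
    rw [PySem.List.enumerate_cons]
    by_cases hx : x = '\n'
    · rw [List.filter_cons_of_pos (by simp [hx])]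
      simp only [List.map_cons, List.mem_cons, ih]
      constructor
      · rintro (rfl | ⟨k, rfl, hk⟩)
        · exact ⟨0, by simp [hx]⟩
        · exact ⟨k + 1, by push_cast; ring_nf, by simpa using hk⟩
      · rintro ⟨k, rfl, hk⟩
        cases k with
        | zero => left; simp
        | succ k => right; exact ⟨k, by push_cast; ring_nf, by simpa using hk⟩
    · rw [List.filter_cons_of_neg (by simp [hx])]
      rw [ih]
      constructor
      · rintro ⟨k, rfl, hk⟩
        exact ⟨k + 1, by push_cast; ring_nf, by simpa using hk⟩
      · rintro ⟨k, rfl, hk⟩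
        cases k with
        | zero => simp [hx] at hk
        | succ k => exact ⟨k, by push_cast; ring_nf, by simpa using hk⟩

theorem pv_mem_newlines_iff_NL (cs : List Char) (i : Int) :
    i ∈ ((PySem.List.enumerate cs).filter (fun p => p.2 == '\n')).map (fun p => p.1) ↔
    pvNL cs i := by
  rw [pv_mem_newlines]
  unfold pvNL
  constructor
  · rintro ⟨k, rfl, hk⟩
    have hkl : k < cs.length := by
      have h := hk
      rw [List.getElem?_eq_some_iff] at h
      exact h.1
    refine ⟨by simp, by simpa using (by exact_mod_cast hkl : ((k : Int) < (cs.length : Int))), ?_⟩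
    simpa using hk
  · rintro ⟨h0, hl, hc⟩
    exact ⟨i.toNat, by omega, hc⟩

theorem pv_newlines_sorted (cs : List Char) :
    (((PySem.List.enumerate cs).filter (fun p => p.2 == '\n')).map (fun p => p.1)).Pairwise (· < ·) := by
  rw [List.pairwise_map]
  have h := PySem.List.pairwise_lt_pyRange_one 0 (0 + (cs.length : Int))
  rw [← PySem.List.map_fst_enumerate cs 0, List.pairwise_map] at h
  exact List.Pairwise.sublist (List.filter_sublist ..) h

-- min? of a list decomposed around its first minimiser.
def pvStep (key : Int → Int) (acc : Option Int) (x : Int) : Option Int :=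
  match acc with
  | none => some x
  | some w => if key x < key w then some x else some w

theorem pv_min?_eq_foldl_step (l : List Int) (key : Int → Int) :
    PySem.List.min? l key = l.foldl (pvStep key) none := by
  unfold PySem.List.min? pvStep
  congr 1
  funext acc x
  cases acc <;> rfl

theorem pv_foldl_min_keep (key : Int → Int) (suf : List Int) (m : Int)
    (h : ∀ y ∈ suf, key m ≤ key y) :
    suf.foldl (pvStep key) (some m) = some m := by
  induction suf with
  | nil => rfl
  | cons y t ih =>
    rw [List.foldl_cons]
    have hy : ¬ key y < key m := not_lt.mpr (h y (by simp))
    simp only [pvStep, hy, if_false]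
    exact ih (fun z hz => h z (by simp [hz]))

theorem pv_foldl_min_reach (key : Int → Int) (pre : List Int) (a m : Int) (suf : List Int)
    (ha : key m < key a) (hpre : ∀ y ∈ pre, key m < key y) (hsuf : ∀ y ∈ suf, key m ≤ key y) :
    (pre ++ m :: suf).foldl (pvStep key) (some a) = some m := by
  induction pre generalizing a with
  | nil =>
    rw [List.nil_append, List.foldl_cons]
    simp only [pvStep, ha, if_true]
    exact pv_foldl_min_keep key suf m hsuf
  | cons p t ih =>
    rw [List.cons_append, List.foldl_cons]
    by_cases h : key p < key a
    · simp only [pvStep, h, if_true]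
      exact ih p (hpre p (by simp)) (fun y hy => hpre y (List.mem_cons_of_mem _ hy))
    · simp only [pvStep, h, if_false]
      exact ih a ha (fun y hy => hpre y (List.mem_cons_of_mem _ hy))

theorem pv_min?_of_decomp (key : Int → Int) (pre : List Int) (m : Int) (suf : List Int)
    (hpre : ∀ y ∈ pre, key m < key y) (hsuf : ∀ y ∈ suf, key m ≤ key y) :
    PySem.List.min? (pre ++ m :: suf) key = some m := by
  rw [pv_min?_eq_foldl_step]
  cases pre with
  | nil =>
    rw [List.nil_append, List.foldl_cons]
    show List.foldl _ (some m) suf = some m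
    exact pv_foldl_min_keep key suf m hsuf
  | cons p t =>
    rw [List.cons_append, List.foldl_cons]
    show List.foldl _ (some p) (t ++ m :: suf) = some m
    exact pv_foldl_min_reach key t p m suf (hpre p (by simp))
      (fun y hy => hpre y (by simp [hy])) hsuf

-- pvRing's guard is exactly pvNL (as a Bool).
theorem pv_guard_iff (cs : List Char) (i : Int) :
    (decide (0 ≤ i) && decide (i < (cs.length : Int)) && (PySem.List.pyGetD cs i ' ' == '\n')) = true
    ↔ pvNL cs i := by
  unfold pvNL
  constructor
  · intro h
    simp only [Bool.and_eq_true, decide_eq_true_eq, beq_iff_eq] at h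
    obtain ⟨⟨h0, hl⟩, hc⟩ := h
    rw [PySem.List.pyGetD_eq_getElem cs ' ' h0 hl] at hc
    exact ⟨h0, hl, by rw [List.getElem?_eq_getElem (by omega), hc]⟩
  · rintro ⟨h0, hl, hc⟩
    simp only [Bool.and_eq_true, decide_eq_true_eq, beq_iff_eq]
    refine ⟨⟨h0, hl⟩, ?_⟩
    rw [PySem.List.pyGetD_eq_getElem cs ' ' h0 hl]
    have hlt : i.toNat < cs.length := by omega
    rw [List.getElem?_eq_getElem hlt] at hc
    exact Option.some_injective _ hc

-- What the ring search returns: -1 with no newline at all, or the first minimiser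
-- of |· - target| among newline positions.
theorem pv_ring_spec (cs : List Char) (target : Int) (ht : 0 ≤ target)
    (fuel : Nat) (d : Int) (hd : 0 ≤ d)
    (hinv : ∀ i, pvNL cs i → d ≤ |i - target|)
    (hfuel : ∀ i, pvNL cs i → |i - target| < d + fuel) :
    (pvRing cs (cs.length : Int) target fuel d = -1 ∧ ∀ i, ¬ pvNL cs i) ∨
    (∃ m, pvRing cs (cs.length : Int) target fuel d = m ∧ pvNL cs m ∧
      (∀ i, pvNL cs i → |m - target| ≤ |i - target|) ∧
      (∀ i, pvNL cs i → i < m → |m - target| < |i - target|)) := by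
  induction fuel generalizing d with
  | zero =>
    left
    refine ⟨rfl, fun i hi => ?_⟩
    have h1 := hinv i hi
    have h2 := hfuel i hi
    simp only [Nat.cast_zero, add_zero] at h2
    omega
  | succ fuel ih =>
    unfold pvRing
    by_cases hb : (decide (0 ≤ target - d) && decide (target - d < (cs.length : Int)) && (PySem.List.pyGetD cs (target - d) ' ' == '\n')) = true
    · rw [if_pos hb]
      right
      have hnl := (pv_guard_iff cs (target - d)).mp hb
      have habs : |target - d - target| = d := by
        rw [show target - d - target = -d by ring, abs_neg, abs_of_nonneg hd]
      refine ⟨target - d, rfl, hnl, ?_, ?_⟩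
      · intro i hi
        rw [habs]
        exact hinv i hi
      · intro i hi hlt
        have h1 := hinv i hi
        rw [habs]
        rcases abs_cases (i - target) with ⟨he, _⟩ | ⟨he, _⟩ <;> omega
    · rw [if_neg hb]
      by_cases ha : (decide (target + d < (cs.length : Int)) && (PySem.List.pyGetD cs (target + d) ' ' == '\n')) = true
      · rw [if_pos ha]
        right
        have hnl : pvNL cs (target + d) := by
          apply (pv_guard_iff cs (target + d)).mp
          simp only [Bool.and_eq_true, decide_eq_true_eq] at ha ⊢
          exact ⟨⟨by omega, ha.1⟩, ha.2⟩
        have habs : |target + d - target| = d := by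
          rw [show target + d - target = d by ring, abs_of_nonneg hd]
        refine ⟨target + d, rfl, hnl, ?_, ?_⟩
        · intro i hi
          rw [habs]
          exact hinv i hi
        · intro i hi hlt
          have h1 := hinv i hi
          rw [habs]
          by_cases hc : |i - target| = d
          · have hieq : i = target - d := by
              rcases abs_cases (i - target) with ⟨he, _⟩ | ⟨he, _⟩ <;> omega
            exact absurd ((pv_guard_iff cs (target - d)).mpr (hieq ▸ hi)) hb
          · omega
      · rw [if_neg ha]
        have hinv' : ∀ i, pvNL cs i → d + 1 ≤ |i - target| := by
          intro i hi
          have h1 := hinv i hi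
          rcases eq_or_lt_of_le h1 with he | hl
          · exfalso
            rcases abs_eq hd |>.mp he.symm with h | h
            · apply ha
              rw [Bool.and_eq_true]
              have : target + d = i := by omega
              rw [this]
              have h2 := (pv_guard_iff cs i).mpr hi
              simp only [Bool.and_eq_true] at h2
              exact ⟨h2.1.2, h2.2⟩
            · apply hb
              rw [pv_guard_iff]
              have : target - d = i := by omega
              rw [this]
              exact hi
          · omega
        have hfuel' : ∀ i, pvNL cs i → |i - target| < (d + 1) + fuel := by
          intro i hi
          have := hfuel i hi
          push_cast at this ⊢
          omega
        exact ih (d + 1) (by omega) hinv' hfuel'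

-- strip of a string ending in a whitespace character drops that character.
theorem pv_rstrip_concat_ws (t : List Char) (x : Char) (hx : PySem.Chars.isspace x = true) :
    PySem.Chars.rstrip (t ++ [x]) = PySem.Chars.rstrip t := by
  unfold PySem.Chars.rstrip
  rw [List.reverse_append, List.reverse_singleton, List.singleton_append,
    List.dropWhile_cons_of_pos hx]

theorem pv_strip_concat_ws (t : List Char) (x : Char) (hx : PySem.Chars.isspace x = true) :
    PySem.Chars.strip (t ++ [x]) = PySem.Chars.strip t := by
  unfold PySem.Chars.strip PySem.Chars.lstrip
  rw [List.dropWhile_append]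
  split
  · next he =>
    rw [List.dropWhile_cons_of_pos hx, List.dropWhile_nil, List.isEmpty_iff.mp he]
  · exact pv_rstrip_concat_ws _ _ hx

-- strip absorbs a previous rstrip("\n").
theorem pv_strip_rdropNL (s : List Char) :
    PySem.Chars.strip (List.rdropWhile (fun c => c == '\n') s) = PySem.Chars.strip s := by
  induction s using List.reverseRecOn with
  | nil => rfl
  | append_singleton t x ih =>
    by_cases hx : x = '\n'
    · rw [List.rdropWhile_concat_pos _ _ _ (by simp [hx]), ih,
        pv_strip_concat_ws t x (by rw [hx]; decide)]
    · rw [List.rdropWhile_concat_neg _ _ _ (by simp [hx])]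

-- ===== VERDICT (by name: the statement is the Claim_ definition above) =====
theorem split_into_two_by_newline_spec : Claim_equal_split_into_two_by_newline := by
  intro text _
  unfold Spec_split_into_two_by_newline
  unfold split_into_two_by_newline split_into_two_by_newline_alt
  simp only []
  set cs := text.toList with hcs
  set target := PySem.Int.floordiv (cs.length : Int) 2 with htarget
  set newlines := ((PySem.List.enumerate cs).filter (fun p => p.2 == '\n')).map (fun p => p.1)
    with hnl
  have ht0 : 0 ≤ target ∧ target ≤ (cs.length : Int) := by
    constructor
    · rw [htarget, PySem.Int.floordiv_eq_ediv_of_pos (by omega)]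
      positivity
    · rw [htarget, PySem.Int.floordiv_eq_ediv_of_pos (by omega)]
      omega
  have hring := pv_ring_spec cs target ht0.1 (max target ((cs.length : Int) - target) + 1).toNat 0
    (by omega) (fun i _ => abs_nonneg _)
    (by
      intro i hi
      obtain ⟨h0, hl, _⟩ := hi
      have : (((max target ((cs.length : Int) - target) + 1).toNat : Int))
          = max target ((cs.length : Int) - target) + 1 := by
        rw [Int.toNat_of_nonneg (by omega)]
      rw [zero_add, this]
      rcases abs_cases (i - target) with ⟨he, _⟩ | ⟨he, _⟩ <;> omega)
  rcases hring with ⟨hres, hnone⟩ | ⟨m, hres, hm, hmin, hfirst⟩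
  · have hempty : newlines = [] := by
      rcases hl : newlines with _ | ⟨a, t⟩
      · rfl
      · exfalso
        exact hnone a ((pv_mem_newlines_iff_NL cs a).mp (by rw [← hnl, hl]; simp))
    rw [if_pos hempty, hres]
    simp
  · -- A's min? returns the same index m
    have hmmem : m ∈ newlines := (pv_mem_newlines_iff_NL cs m).mpr hm
    obtain ⟨pre, suf, hdec⟩ := List.append_of_mem hmmem
    have hpw : newlines.Pairwise (· < ·) := pv_newlines_sorted cs
    rw [hdec] at hpw
    have hsplit := List.pairwise_append.mp hpw
    have hmin? : PySem.List.min? newlines (fun i => |i - target|) = some m := by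
      rw [hdec]
      apply pv_min?_of_decomp
      · intro y hy
        have hyNL : pvNL cs y := (pv_mem_newlines_iff_NL cs y).mp (by rw [← hnl, hdec]; simp [hy])
        have hylt : y < m := hsplit.2.2 y hy m (by simp)
        exact hfirst y hyNL hylt
      · intro y hy
        have hyNL : pvNL cs y := (pv_mem_newlines_iff_NL cs y).mp (by rw [← hnl, hdec]; simp [hy])
        exact hmin y hyNL
    have hne : newlines ≠ [] := by rw [hdec]; simp
    rw [if_neg hne, hmin?, hres]
    have hm1 : ¬ (m = -1) := by obtain ⟨h0, _, _⟩ := hm; omega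
    rw [if_pos hm1]
    simp only [pv_strip_rdropNL]
    set left := PySem.Chars.strip (PySem.List.slice cs none (some m)) with hleft
    set right := PySem.Chars.strip (PySem.List.slice cs (some (m + 1)) none) with hright
    by_cases he : left = [] ∨ right = []
    · rw [if_pos he]
      have hb : (!left.isEmpty && !right.isEmpty) = false := by
        rcases he with he | he <;> simp [he]
      rw [hb]
      simp
    · rw [if_neg he]
      rw [not_or] at he
      have hl : left.isEmpty = false := by simp [he.1]
      have hr : right.isEmpty = false := by simp [he.2]
      simp [hl, hr, List.filter]
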